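-- pv_equiv track=rewrite | github.com/mei28/Competitive-programing | sky-8/a.py | find_nth_non_reserved
-- ===== SOURCE A (Python) =====
-- def index_to_word(index: int) -> str:
--     result = []
--     while index >= 0:
--         result.append(chr((index % 26) + ord("a")))
--         index = index // 26 - 1
--     return "".join(result[::-1])
--
-- def find_nth_non_reserved(n: int, reserved_indices: list) -> str:
--     current_index = 0
--     count = 0
--
--     for reserved_index in reserved_indices:
--         if reserved_index > current_index:
--             non_reserved_count = reserved_index - current_index
--             if count + non_reserved_count >= n:
--                 return index_to_word(current_index + (n - count) - 1)
--             count += non_reserved_count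
--         current_index = reserved_index + 1
--
--     return index_to_word(current_index + (n - count) - 1)
-- ===== SOURCE B (Python) =====
-- def index_to_word(index: int) -> str:
--     if index < 0:
--         return ""
--     return index_to_word(index // 26 - 1) + chr(index % 26 + ord("a"))
--
-- def find_nth_non_reserved(n: int, reserved_indices: list) -> str:
--     # Precompute, for each reserved index, the start of the gap before it and
--     # the running total of non-reserved slots seen so far; then binary-search
--     # the (nondecreasing) totals for the first gap that reaches n.
--     starts = [0] + [r + 1 for r in reserved_indices]
--     gaps = [max(0, r - s) for s, r in zip(starts, reserved_indices)]
--     pre = []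
--     total = 0
--     for g in gaps:
--         total += g
--         pre.append(total)
--     target = max(n, 1)  # only a gap with at least one slot can be the answer
--     lo, hi = 0, len(pre)
--     while lo < hi:
--         mid = (lo + hi) // 2
--         if pre[mid] >= target:
--             hi = mid
--         else:
--             lo = mid + 1
--     before = pre[lo - 1] if lo > 0 else 0
--     return index_to_word(starts[lo] + (n - before) - 1)
-- ===== Notes on version B (the rewrite author's own statement) =====
-- stated objective: alternative
-- what changed: B precomputes gap starts and nondecreasing prefix sums of non-reserved counts and binary-searches them for the first gap reaching n (one unified index formula, no early-return streaming state), and index_to_word is recursive instead of loop-append-reverse.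
import Mathlib
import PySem

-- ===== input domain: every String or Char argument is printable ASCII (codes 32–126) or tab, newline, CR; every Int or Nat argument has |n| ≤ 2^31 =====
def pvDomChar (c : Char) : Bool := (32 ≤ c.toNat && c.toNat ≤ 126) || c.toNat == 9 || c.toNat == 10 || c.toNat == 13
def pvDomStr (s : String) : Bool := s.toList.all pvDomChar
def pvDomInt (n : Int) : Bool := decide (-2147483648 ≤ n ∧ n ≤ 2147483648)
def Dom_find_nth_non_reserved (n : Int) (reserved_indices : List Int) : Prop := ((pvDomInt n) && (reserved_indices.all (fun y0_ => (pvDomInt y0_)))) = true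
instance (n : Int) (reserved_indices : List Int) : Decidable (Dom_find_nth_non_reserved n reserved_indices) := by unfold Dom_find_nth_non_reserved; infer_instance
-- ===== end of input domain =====

-- B replaces A's streaming early-return loop by precomputed gap prefix sums plus a binary
-- search for the first gap that reaches n (objective: alternative; same return value).

-- chr((i % 26) + ord("a")), shared by both ports
def pvChr (i : Int) : Char := Char.ofNat ((PySem.Int.mod i 26).toNat + 97)

-- termination lemmas for the ports' well-founded recursions (cited by decreasing_by;
-- kept small and term-mode on purpose)
theorem pv_itw_dec (index : Int) (h : 0 ≤ index) :
    (PySem.Int.floordiv index 26 - 1 + 1).toNat < (index + 1).toNat := by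
  rw [Int.sub_add_cancel, PySem.Int.floordiv_eq_ediv_of_pos (by decide)]
  exact (Int.toNat_lt_toNat (Int.lt_add_one_iff.mpr h)).mpr
    (Int.lt_add_one_iff.mpr (Int.ediv_le_self 26 h))

theorem pv_le_half (lo hi : Nat) (h : lo < hi) : lo ≤ (lo + hi) / 2 :=
  (Nat.le_div_iff_mul_le Nat.two_pos).mpr
    (by rw [Nat.mul_two]; exact Nat.add_le_add_left (Nat.le_of_lt h) lo)

theorem pv_bs_dec1 (lo hi : Nat) (h : lo < hi) : (lo + hi) / 2 - lo < hi - lo :=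
  Nat.sub_lt_sub_right (pv_le_half lo hi h)
    ((Nat.div_lt_iff_lt_mul Nat.two_pos).mpr
      (by rw [Nat.mul_two]; exact Nat.add_lt_add_right h hi))

theorem pv_bs_dec2 (lo hi : Nat) (h : lo < hi) : hi - ((lo + hi) / 2 + 1) < hi - lo :=
  Nat.sub_lt_sub_left h (Nat.lt_succ_of_le (pv_le_half lo hi h))

-- ===== PORT A =====
-- the while-loop of A's index_to_word: appends digits low-to-high into `result`
def itwLoopA (index : Int) (result : List Char) : List Char :=
  if 0 ≤ index then
    itwLoopA (PySem.Int.floordiv index 26 - 1) (result ++ [pvChr index])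
  else result
termination_by (index + 1).toNat
decreasing_by exact pv_itw_dec index (by assumption)

-- "".join(result[::-1])
def index_to_word (index : Int) : String := String.mk ((itwLoopA index []).reverse)

-- A's for-loop over reserved_indices with state (current_index, count) and early return
def goA (n : Int) (rs : List Int) (cur count : Int) : String :=
  match rs with
  | [] => index_to_word (cur + (n - count) - 1)
  | r :: rest =>
    if cur < r then
      if n ≤ count + (r - cur) then index_to_word (cur + (n - count) - 1)
      else goA n rest (r + 1) (count + (r - cur))
    else goA n rest (r + 1) count

def find_nth_non_reserved (n : Int) (reserved_indices : List Int) : String :=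
  goA n reserved_indices 0 0

-- ===== PORT B =====
-- Source B's recursive index_to_word, building the character list high-to-low
def itwAltChars (index : Int) : List Char :=
  if index < 0 then []
  else itwAltChars (PySem.Int.floordiv index 26 - 1) ++ [pvChr index]
termination_by (index + 1).toNat
decreasing_by exact pv_itw_dec index (Int.not_lt.mp (by assumption))

def index_to_word_alt (index : Int) : String := String.mk (itwAltChars index)

-- the `for g in gaps` loop of Source B building the prefix-sum list `pre`
def bPreLoop (gaps : List Int) (pre : List Int) (total : Int) : List Int × Int :=
  match gaps with
  | [] => (pre, total)
  | g :: gs => bPreLoop gs (pre ++ [total + g]) (total + g)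

-- Source B's `while lo < hi` binary search
def bSearch (pre : List Int) (target : Int) (lo hi : Nat) : Nat :=
  if lo < hi then
    let mid := (lo + hi) / 2
    if target ≤ pre.getD mid 0 then bSearch pre target lo mid
    else bSearch pre target (mid + 1) hi
  else lo
termination_by hi - lo
decreasing_by
  · exact pv_bs_dec1 lo hi (by assumption)
  · exact pv_bs_dec2 lo hi (by assumption)

def find_nth_non_reserved_alt (n : Int) (reserved_indices : List Int) : String :=
  let starts : List Int := 0 :: reserved_indices.map (fun r => r + 1)
  let gaps := List.zipWith (fun s r => max 0 (r - s)) starts reserved_indices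
  let pre := (bPreLoop gaps [] 0).1
  let target := max n 1
  let lo := bSearch pre target 0 pre.length
  let before := if 0 < lo then pre.getD (lo - 1) 0 else 0
  index_to_word_alt (starts.getD lo 0 + (n - before) - 1)

-- ===== PRECONDITION & SPEC =====
def Spec_find_nth_non_reserved (n : Int) (reserved_indices : List Int) (out : String) : Prop := out = find_nth_non_reserved_alt n reserved_indices
instance (n : Int) (reserved_indices : List Int) (out : String) : Decidable (Spec_find_nth_non_reserved n reserved_indices out) := by unfold Spec_find_nth_non_reserved; infer_instance

-- ===== CLAIM (what is proved, stated in full; the proofs are below) =====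
def Claim_equal_find_nth_non_reserved : Prop := ∀ (n : Int) (reserved_indices : List Int), Dom_find_nth_non_reserved n reserved_indices → Spec_find_nth_non_reserved n reserved_indices (find_nth_non_reserved n reserved_indices)

-- ===== LEMMAS AND PROOFS =====

-- accumulator lemma for A's digit loop
theorem itwLoopA_append (index : Int) : ∀ acc : List Char, itwLoopA index acc = acc ++ itwLoopA index [] := by
  generalize hk : (index + 1).toNat = k
  induction k using Nat.strong_induction_on generalizing index with
  | _ k IH =>
    intro acc
    rw [itwLoopA.eq_def (index := index) (result := acc), itwLoopA.eq_def (index := index) (result := [])]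
    by_cases h : 0 ≤ index
    · simp only [if_pos h]
      have hlt : (PySem.Int.floordiv index 26 - 1 + 1).toNat < k := by
        rw [PySem.Int.floordiv_eq_ediv_of_pos (by norm_num)]
        have h1 : index / 26 ≤ index := Int.ediv_le_self 26 h
        have h2 : 0 ≤ index / 26 := Int.ediv_nonneg h (by norm_num)
        omega
      rw [IH _ hlt _ rfl (acc ++ [pvChr index]), IH _ hlt _ rfl ([] ++ [pvChr index])]
      simp
    · simp [if_neg h]

-- the reversed digit list of A's loop is B's recursion
theorem itwLoopA_reverse (index : Int) : (itwLoopA index []).reverse = itwAltChars index := by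
  generalize hk : (index + 1).toNat = k
  induction k using Nat.strong_induction_on generalizing index with
  | _ k IH =>
    rw [itwLoopA, itwAltChars]
    by_cases h : 0 ≤ index
    · simp only [if_pos h, if_neg (by omega : ¬ index < 0)]
      have hlt : (PySem.Int.floordiv index 26 - 1 + 1).toNat < k := by
        rw [PySem.Int.floordiv_eq_ediv_of_pos (by norm_num)]
        have h1 : index / 26 ≤ index := Int.ediv_le_self 26 h
        have h2 : 0 ≤ index / 26 := Int.ediv_nonneg h (by norm_num)
        omega
      rw [itwLoopA_append]
      simp only [List.reverse_append, List.nil_append, List.reverse_cons, List.reverse_nil]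
      rw [IH _ hlt _ rfl]
    · simp [if_neg h, if_pos (by omega : index < 0)]

theorem word_eq (index : Int) : index_to_word index = index_to_word_alt index := by
  unfold index_to_word index_to_word_alt
  rw [itwLoopA_reverse]

-- reference prefix-sum list (proof-side only)
def preFrom (c : Int) : List Int → List Int
  | [] => []
  | g :: gs => (c + g) :: preFrom (c + g) gs

-- reference linear search: least index with target ≤ pre[i], or length
def leastIdx (t : Int) : List Int → Nat
  | [] => 0
  | p :: ps => if t ≤ p then 0 else leastIdx t ps + 1

theorem bPreLoop_eq (gaps : List Int) : ∀ (acc : List Int) (c : Int), (bPreLoop gaps acc c).1 = acc ++ preFrom c gaps := by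
  induction gaps with
  | nil => intro acc c; simp [bPreLoop, preFrom]
  | cons g gs ih => intro acc c; simp [bPreLoop, preFrom, ih]

theorem preFrom_length (c : Int) (gs : List Int) : (preFrom c gs).length = gs.length := by
  induction gs generalizing c with
  | nil => simp [preFrom]
  | cons g gs ih => simp [preFrom, ih]

theorem le_preFrom_getD (gs : List Int) (hg : ∀ g ∈ gs, 0 ≤ g) (c : Int) :
    ∀ i, i < gs.length → c ≤ (preFrom c gs).getD i 0 := by
  induction gs generalizing c with
  | nil => intro i hi; simp at hi
  | cons g gs ih =>
    intro i hi
    match i with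
    | 0 => have := hg g (by simp); simp [preFrom]; omega
    | Nat.succ j =>
      have h1 : c + g ≤ (preFrom (c + g) gs).getD j 0 :=
        ih (fun x hx => hg x (by simp [hx])) (c + g) j (by simpa using hi)
      have := hg g (by simp)
      simp only [preFrom, List.getD_cons_succ]
      omega

theorem preFrom_mono (gs : List Int) (hg : ∀ g ∈ gs, 0 ≤ g) (c : Int) :
    ∀ i j, i ≤ j → j < gs.length → (preFrom c gs).getD i 0 ≤ (preFrom c gs).getD j 0 := by
  induction gs generalizing c with
  | nil => intro i j _ hj; simp at hj
  | cons g gs ih =>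
    intro i j hij hj
    match i, j with
    | 0, 0 => omega
    | 0, Nat.succ j =>
      have h1 : c + g ≤ (preFrom (c + g) gs).getD j 0 :=
        le_preFrom_getD gs (fun x hx => hg x (by simp [hx])) (c + g) j (by simpa using hj)
      simp only [preFrom, List.getD_cons_zero, List.getD_cons_succ]
      omega
    | Nat.succ i, Nat.succ j =>
      simp only [preFrom, List.getD_cons_succ]
      exact ih (fun x hx => hg x (by simp [hx])) (c + g) i j (by omega) (by simpa using hj)

theorem leastIdx_unique (t : Int) (pre : List Int) :
    ∀ L : Nat, L ≤ pre.length → (∀ j, j < L → pre.getD j 0 < t) →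
      (L < pre.length → t ≤ pre.getD L 0) → L = leastIdx t pre := by
  induction pre with
  | nil => intro L hL _ _; simpa [leastIdx] using hL
  | cons p ps ih =>
    intro L hL hlt hge
    by_cases hp : t ≤ p
    · simp only [leastIdx, if_pos hp]
      by_contra hne
      have h0 : (0:Nat) < L := by omega
      have := hlt 0 h0
      simp at this; omega
    · simp only [leastIdx, if_neg hp]
      match L with
      | 0 =>
        exfalso
        have := hge (by simp)
        simp at this; omega
      | Nat.succ L' =>
        have : L' = leastIdx t ps := by
          refine ih L' (by simpa using hL) (fun j hj => ?_) (fun h => ?_)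
          · have := hlt (j + 1) (by omega); simpa using this
          · have := hge (by simpa using h); simpa using this
        omega

theorem bSearch_props (pre : List Int) (t : Int)
    (mono : ∀ i j, i ≤ j → j < pre.length → pre.getD i 0 ≤ pre.getD j 0) :
    ∀ k lo hi, hi - lo = k → lo ≤ hi → hi ≤ pre.length →
      (∀ j, j < lo → pre.getD j 0 < t) →
      (∀ j, hi ≤ j → j < pre.length → t ≤ pre.getD j 0) →
      (∀ j, j < bSearch pre t lo hi → pre.getD j 0 < t) ∧
        bSearch pre t lo hi ≤ pre.length ∧
        (bSearch pre t lo hi < pre.length → t ≤ pre.getD (bSearch pre t lo hi) 0) := by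
  intro k
  induction k using Nat.strong_induction_on with
  | _ k IH =>
    intro lo hi hk hlohi hhi hinvlo hinvhi
    rw [bSearch]
    by_cases h : lo < hi
    · simp only [if_pos h]
      set mid := (lo + hi) / 2 with hmid
      have hmlo : lo ≤ mid := by omega
      have hmhi : mid < hi := by omega
      by_cases hc : t ≤ pre.getD mid 0
      · simp only [if_pos hc]
        exact IH (mid - lo) (by omega) lo mid rfl (by omega) (by omega) hinvlo
          (fun j hj hjlen => le_trans hc (mono mid j hj hjlen))
      · simp only [if_neg hc]
        refine IH (hi - (mid + 1)) (by omega) (mid + 1) hi rfl (by omega) hhi ?_ hinvhi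
        intro j hj
        have hjlen : j < pre.length := by omega
        have := mono j mid (by omega) (by omega)
        omega
    · simp only [if_neg h]
      refine ⟨hinvlo, by omega, fun hlt => hinvhi lo (by omega) hlt⟩

theorem bSearch_eq_leastIdx (pre : List Int) (t : Int)
    (mono : ∀ i j, i ≤ j → j < pre.length → pre.getD i 0 ≤ pre.getD j 0) :
    bSearch pre t 0 pre.length = leastIdx t pre := by
  have h := bSearch_props pre t mono pre.length 0 pre.length (by omega) (by omega) (by omega)
    (fun j hj => by omega) (fun j hj hjl => by omega)
  exact leastIdx_unique t pre _ h.2.1 h.1 h.2.2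

theorem gaps_nonneg (ss rs : List Int) :
    ∀ x ∈ List.zipWith (fun s r => max 0 (r - s)) ss rs, 0 ≤ x := by
  induction ss generalizing rs with
  | nil => simp
  | cons s ss ih =>
    match rs with
    | [] => simp
    | r :: rs =>
      intro x hx
      simp only [List.zipWith_cons_cons, List.mem_cons] at hx
      rcases hx with h | h
      · omega
      · exact ih rs x h

-- the heart of the proof: A's streaming loop equals the prefix-sum/first-index formula
theorem goA_eq (n : Int) : ∀ (rs : List Int) (cur c : Int), 0 ≤ c → c < max n 1 →
    goA n rs cur c =
      (let starts := cur :: rs.map (fun r => r + 1)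
       let gaps := List.zipWith (fun s r => max 0 (r - s)) starts rs
       let pre := preFrom c gaps
       let L := leastIdx (max n 1) pre
       let before := if 0 < L then pre.getD (L - 1) 0 else c
       String.mk (itwAltChars (starts.getD L 0 + (n - before) - 1))) := by
  intro rs
  induction rs with
  | nil =>
    intro cur c hc0 hcn
    simp only [goA, List.map_nil, List.zipWith_nil_right, preFrom, leastIdx]
    simp only [if_neg (by omega : ¬ (0:Nat) < 0), List.getD_cons_zero]
    rw [word_eq]; rfl
  | cons r rest ih =>
    intro cur c hc0 hcn
    have hzip : List.zipWith (fun s r => max 0 (r - s)) (cur :: (r :: rest).map (fun r => r + 1)) (r :: rest)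
        = max 0 (r - cur) :: List.zipWith (fun s r => max 0 (r - s)) ((r + 1) :: rest.map (fun r => r + 1)) rest := by
      simp
    simp only [hzip, preFrom]
    set g := max 0 (r - cur) with hg
    set gaps' := List.zipWith (fun s r => max 0 (r - s)) ((r + 1) :: rest.map (fun r => r + 1)) rest with hgaps'
    by_cases hfire : max n 1 ≤ c + g
    · -- the first gap already reaches n: A returns here, L = 0
      have hcur : cur < r := by omega
      have hn : n ≤ c + (r - cur) := by omega
      simp only [goA, if_pos hcur, if_pos hn, leastIdx, if_pos hfire]
      simp only [if_neg (by omega : ¬ (0:Nat) < 0), List.getD_cons_zero]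
      rw [word_eq]; rfl
    · -- not reached yet: both sides step to the tail
      have hrec : goA n (r :: rest) cur c = goA n rest (r + 1) (c + g) := by
        by_cases hcur : cur < r
        · have : ¬ n ≤ c + (r - cur) := by omega
          simp only [goA, if_pos hcur, if_neg this]
          congr 1; omega
        · simp only [goA, if_neg hcur]
          congr 1; omega
      rw [hrec, ih (r + 1) (c + g) (by omega) (by omega)]
      simp only [leastIdx, if_neg hfire]
      set L' := leastIdx (max n 1) (preFrom (c + g) gaps') with hL'
      match L' with
      | 0 => simp
      | Nat.succ m =>
        simp only [List.map_cons, List.getD_cons_succ, Nat.succ_sub_one,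
          if_pos (Nat.succ_pos m)]
        rw [← hgaps']
        simp

-- ===== VERDICT (by name: the statement is the Claim_ definition above) =====
theorem find_nth_non_reserved_spec : Claim_equal_find_nth_non_reserved := by
  intro n reserved_indices _
  unfold Spec_find_nth_non_reserved find_nth_non_reserved find_nth_non_reserved_alt
  simp only []
  rw [goA_eq n reserved_indices 0 0 (by omega) (by omega)]
  rw [bPreLoop_eq, List.nil_append]
  rw [bSearch_eq_leastIdx _ _ (by
    intro i j hij hj
    rw [preFrom_length] at hj
    exact preFrom_mono _ (gaps_nonneg _ _) 0 i j hij hj)]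
  rfl
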